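-- pv_equiv track=rewrite | github.com/kkoripl/FootballTacticsByBallEvents | predict_team_by_occupancy_maps.py | filterDataByTeamsOccurancesMoreThan
-- ===== SOURCE A (Python) =====
-- def filterDataByTeamsOccurancesMoreThan(teams, occurances_cnt):
--     unique_teams = getUniqueTeams(teams)
--     occurances = {}
--     for i in range(0,len(unique_teams)):
--         cnt = teams.count(unique_teams[i])
--         if cnt >= occurances_cnt and unique_teams[i] != 'FC Barcelona':
--             occurances[unique_teams[i]] = True
--         else:
--             occurances[unique_teams[i]] = False
--     return [occurances[team] for team in teams]
--
-- def getUniqueTeams(teams):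
--     return list(set(teams))
-- ===== SOURCE B (Python) =====
-- def filterDataByTeamsOccurancesMoreThan(teams, occurances_cnt):
--     return [teams.count(team) >= occurances_cnt and team != 'FC Barcelona'
--             for team in teams]
-- ===== Notes on version B (the rewrite author's own statement) =====
-- stated objective: simpler
-- what changed: Drops getUniqueTeams, the set deduplication and the cached occurances dict entirely; B computes the verdict inline per element in a single comprehension over teams, re-counting for each occurrence instead of building a per-unique-team table first.
import Mathlib
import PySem

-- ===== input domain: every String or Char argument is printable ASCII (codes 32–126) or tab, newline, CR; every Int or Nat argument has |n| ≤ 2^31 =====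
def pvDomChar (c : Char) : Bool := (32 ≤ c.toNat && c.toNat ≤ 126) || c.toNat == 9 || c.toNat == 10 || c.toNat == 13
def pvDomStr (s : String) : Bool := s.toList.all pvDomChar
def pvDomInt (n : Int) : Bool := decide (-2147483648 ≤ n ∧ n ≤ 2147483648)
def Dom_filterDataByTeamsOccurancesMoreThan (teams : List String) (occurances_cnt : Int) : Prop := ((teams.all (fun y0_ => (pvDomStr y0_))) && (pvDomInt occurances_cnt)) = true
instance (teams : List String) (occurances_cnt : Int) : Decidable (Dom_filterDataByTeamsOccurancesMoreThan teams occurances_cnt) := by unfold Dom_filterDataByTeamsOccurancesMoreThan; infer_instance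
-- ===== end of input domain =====

-- B replaces A's set-dedup + cached dict with a single inline comprehension over teams (simpler, same result).


-- ===== PORT A =====
-- list(set(teams)): PySem.Set.ofList (distinct elements); A's result does not depend on
-- Python's hash iteration order, since the dict is keyed per team.
def getUniqueTeams (teams : List String) : List String := PySem.Set.ofList teams

-- occurances[team]: the key is always present (every team is in unique_teams), so the
-- total getD lookup is exact here.
def filterDataByTeamsOccurancesMoreThan (teams : List String) (occurances_cnt : Int) : List Bool :=
  let unique_teams := getUniqueTeams teams
  let occurances : PySem.Dict String Bool :=
    unique_teams.foldl (fun d u =>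
      if (PySem.List.count teams u : Int) ≥ occurances_cnt ∧ u ≠ "FC Barcelona"
      then d.insert u true
      else d.insert u false) PySem.Dict.empty
  teams.map (fun team => occurances.getD team false)

-- ===== PORT B =====
def filterDataByTeamsOccurancesMoreThan_alt (teams : List String) (occurances_cnt : Int) : List Bool :=
  teams.map (fun team =>
    decide ((PySem.List.count teams team : Int) ≥ occurances_cnt) && decide (team ≠ "FC Barcelona"))

-- ===== PRECONDITION & SPEC =====
def Spec_filterDataByTeamsOccurancesMoreThan (teams : List String) (occurances_cnt : Int) (out : List Bool) : Prop := out = filterDataByTeamsOccurancesMoreThan_alt teams occurances_cnt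
instance (teams : List String) (occurances_cnt : Int) (out : List Bool) : Decidable (Spec_filterDataByTeamsOccurancesMoreThan teams occurances_cnt out) := by unfold Spec_filterDataByTeamsOccurancesMoreThan; infer_instance

-- ===== CLAIM (what is proved, stated in full; the proofs are below) =====
def Claim_equal_filterDataByTeamsOccurancesMoreThan : Prop := ∀ (teams : List String) (occurances_cnt : Int), Dom_filterDataByTeamsOccurancesMoreThan teams occurances_cnt → Spec_filterDataByTeamsOccurancesMoreThan teams occurances_cnt (filterDataByTeamsOccurancesMoreThan teams occurances_cnt)

-- ===== LEMMAS AND PROOFS =====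

-- A dict built by inserting (u, f u) over a list answers f t on every key t of the list.
theorem getD_foldl_insert_fun (f : String → Bool) (L : List String)
    (d : PySem.Dict String Bool) (t : String) :
    (L.foldl (fun d u => d.insert u (f u)) d).getD t false =
      if t ∈ L then f t else d.getD t false := by
  induction L generalizing d with
  | nil => simp
  | cons u L ih =>
    simp only [List.foldl_cons, ih, PySem.Dict.getD_insert, List.mem_cons]
    by_cases h : t ∈ L
    · simp [h]
    · by_cases he : t = u <;> simp [h, he]

-- ===== VERDICT (by name: the statement is the Claim_ definition above) =====
theorem filterDataByTeamsOccurancesMoreThan_spec : Claim_equal_filterDataByTeamsOccurancesMoreThan := by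
  intro teams occ _
  unfold Spec_filterDataByTeamsOccurancesMoreThan
  unfold filterDataByTeamsOccurancesMoreThan filterDataByTeamsOccurancesMoreThan_alt getUniqueTeams
  have hfun : (fun (d : PySem.Dict String Bool) (u : String) =>
      if (PySem.List.count teams u : Int) ≥ occ ∧ u ≠ "FC Barcelona"
      then d.insert u true else d.insert u false)
      = fun d u => d.insert u (decide ((PySem.List.count teams u : Int) ≥ occ ∧ u ≠ "FC Barcelona")) := by
    funext d u
    by_cases h : (PySem.List.count teams u : Int) ≥ occ ∧ u ≠ "FC Barcelona"
    · rw [if_pos h, decide_eq_true h]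
    · rw [if_neg h, decide_eq_false h]
  rw [hfun]
  refine List.map_congr_left (fun t ht => ?_)
  rw [getD_foldl_insert_fun]
  have hm : t ∈ PySem.Set.ofList teams := (PySem.Set.mem_ofList teams t).mpr ht
  simp [hm]
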